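-- pv_equiv track=rewrite | github.com/6ka/totally_balanced_structures | DLC/diss_approximation/gamma_free_matrix_numbers.py | columns_as_truncated_balls
-- ===== SOURCE A (Python) =====
-- def down_number_matrix(binary_matrix):
--     """
--     larger or equal to line
--     :param binary_matrix:
--     :return:
--     """
--
--     down, count = init_counters(len(binary_matrix[0]))
--
--     for line in reversed(binary_matrix):
--         add_line_true_to_count(line, count)
--         down.append(list(count))
--
--     down.reverse()
--
--     return down
--
-- def init_counters(line_size):
--     return [], [0] * line_size
--
-- def add_line_true_to_count(line, count):
--     for index, element in enumerate(line):
--         if element: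
--             count[index] += 1
--
-- def up_number_matrix(binary_matrix):
--     """
--     strictly smaller than line
--
--     :param binary_matrix:
--     :return:
--     """
--
--     up, count = init_counters(len(binary_matrix[0]))
--
--     for line in binary_matrix:
--         up.append(list(count))
--         add_line_true_to_count(line, count)
--
--     up.append(list(count))
--
--     return up
--
-- def columns_as_truncated_balls(binary_matrix):
--     up_count = up_number_matrix(binary_matrix)
--     down_count = down_number_matrix(binary_matrix)
--
--     truncated_balls = []
--     for i, line in enumerate(binary_matrix):
--         last_size = 0
--         for j, element in enumerate(line):
--             if element and up_count[i][j] == 0 and down_count[i][j] > last_size: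
--                 last_size = down_count[i][j]
--                 truncated_balls.append((i, j))
--
--     return truncated_balls
-- ===== SOURCE B (Python) =====
-- def columns_as_truncated_balls(binary_matrix):
--     width = len(binary_matrix[0])
--     col_total = [0] * width
--     first_true_row = [None] * width
--     for i, line in enumerate(binary_matrix):
--         for j, element in enumerate(line):
--             if element:
--                 col_total[j] += 1
--                 if first_true_row[j] is None:
--                     first_true_row[j] = i
--
--     truncated_balls = []
--     for i, line in enumerate(binary_matrix):
--         last_size = 0
--         for j, element in enumerate(line):
--             if element and first_true_row[j] == i and col_total[j] > last_size:
--                 last_size = col_total[j]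
--                 truncated_balls.append((i, j))
--
--     return truncated_balls
-- ===== Notes on version B (the rewrite author's own statement) =====
-- stated objective: faster
-- what changed: Replaces the two full (rows+1) x cols prefix/suffix count matrices (up_number_matrix/down_number_matrix) by two per-column scalars computed in one sweep - col_total[j] and first_true_row[j] - using the identity that a cell has up_count 0 iff it is the topmost true cell of its column, where down_count equals the whole column total.
import Mathlib
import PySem

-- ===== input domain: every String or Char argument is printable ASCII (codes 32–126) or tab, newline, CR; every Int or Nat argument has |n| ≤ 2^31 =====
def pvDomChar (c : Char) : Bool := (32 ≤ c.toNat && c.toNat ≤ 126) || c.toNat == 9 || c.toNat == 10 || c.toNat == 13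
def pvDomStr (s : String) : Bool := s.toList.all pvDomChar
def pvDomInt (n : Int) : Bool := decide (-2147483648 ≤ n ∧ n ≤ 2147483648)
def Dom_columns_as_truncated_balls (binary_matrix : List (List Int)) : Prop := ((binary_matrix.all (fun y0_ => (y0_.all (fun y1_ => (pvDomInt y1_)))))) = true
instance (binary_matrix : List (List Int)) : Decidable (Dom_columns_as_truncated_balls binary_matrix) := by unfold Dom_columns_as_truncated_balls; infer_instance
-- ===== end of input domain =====

-- B replaces A's two full (rows+1)×cols prefix/suffix count matrices by two per-column
-- summaries (column total and topmost-true row) computed in one sweep: same return value,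
-- O(cols) extra space instead of O(rows·cols).

-- ===== PORT A =====
-- add_line_true_to_count: `count[index] += 1` raises IndexError when a truthy element sits at
-- an index ≥ len(count); those inputs are excluded by Pre_ (List.modify is a no-op there).
def pvStepA (c : List Int) (p : Int × Int) : List Int :=
  if p.2 ≠ 0 then c.modify p.1.toNat (· + 1) else c

def pvAddLine (line count : List Int) : List Int :=
  (PySem.List.enumerate line).foldl pvStepA count

-- down_number_matrix; `binary_matrix[0]` raises IndexError on an empty matrix
-- (excluded by Pre_; ported as headD [])
def pvDownMatrix (bm : List (List Int)) : List (List Int) :=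
  let st := bm.reverse.foldl
    (fun (s : List (List Int) × List Int) line =>
      let c := pvAddLine line s.2
      (s.1 ++ [c], c))
    ([], List.replicate (bm.headD []).length (0 : Int))
  st.1.reverse

-- up_number_matrix
def pvUpMatrix (bm : List (List Int)) : List (List Int) :=
  let st := bm.foldl
    (fun (s : List (List Int) × List Int) line =>
      (s.1 ++ [s.2], pvAddLine line s.2))
    ([], List.replicate (bm.headD []).length (0 : Int))
  st.1 ++ [st.2]

-- up_count[i][j] / down_count[i][j] are always in range under Pre_; getD transliterates the access
def columns_as_truncated_balls (binary_matrix : List (List Int)) : List (Int × Int) :=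
  let up := pvUpMatrix binary_matrix
  let down := pvDownMatrix binary_matrix
  (PySem.List.enumerate binary_matrix).foldl
    (fun acc pi =>
      ((PySem.List.enumerate pi.2).foldl
        (fun (s : Int × List (Int × Int)) pj =>
          if pj.2 ≠ 0 ∧ ((up.getD pi.1.toNat []).getD pj.1.toNat 0) = 0 ∧
              s.1 < ((down.getD pi.1.toNat []).getD pj.1.toNat 0)
          then (((down.getD pi.1.toNat []).getD pj.1.toNat 0), s.2 ++ [(pi.1, pj.1)])
          else s)
        (0, acc)).2)
    []

-- ===== PORT B =====
-- one sweep computing col_total (first component) and first_true_row (second component);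
-- `col_total[j] += 1` likewise raises IndexError for a truthy index ≥ width (excluded by Pre_)
def pvStepScan (iv : Int) (t : List Int × List (Option Int)) (pj : Int × Int) :
    List Int × List (Option Int) :=
  if pj.2 ≠ 0 then
    (t.1.modify pj.1.toNat (· + 1),
     if t.2.getD pj.1.toNat none = none then t.2.set pj.1.toNat (some iv) else t.2)
  else t

def pvColScan (bm : List (List Int)) : List Int × List (Option Int) :=
  (PySem.List.enumerate bm).foldl
    (fun t pi => (PySem.List.enumerate pi.2).foldl (pvStepScan pi.1) t)
    (List.replicate (bm.headD []).length (0 : Int),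
     List.replicate (bm.headD []).length (none : Option Int))

def columns_as_truncated_balls_alt (binary_matrix : List (List Int)) : List (Int × Int) :=
  let ct := pvColScan binary_matrix
  (PySem.List.enumerate binary_matrix).foldl
    (fun acc pi =>
      ((PySem.List.enumerate pi.2).foldl
        (fun (s : Int × List (Int × Int)) pj =>
          if pj.2 ≠ 0 ∧ ct.2.getD pj.1.toNat none = some pi.1 ∧
              s.1 < ct.1.getD pj.1.toNat 0
          then ((ct.1.getD pj.1.toNat 0), s.2 ++ [(pi.1, pj.1)])
          else s)
        (0, acc)).2)
    []

-- ===== PRECONDITION & SPEC =====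
-- Pre_ excludes exactly the inputs on which Python A raises IndexError: the empty matrix
-- (binary_matrix[0]) and matrices with a truthy element at a column index ≥ len(row 0)
-- (count[index] += 1); Python B raises on exactly the same inputs.
def Pre_columns_as_truncated_balls (binary_matrix : List (List Int)) : Prop :=
  binary_matrix ≠ [] ∧
  ∀ row ∈ binary_matrix, ∀ p ∈ PySem.List.enumerate row,
    p.2 ≠ 0 → p.1 < ((binary_matrix.headD []).length : Int)
instance (binary_matrix : List (List Int)) : Decidable (Pre_columns_as_truncated_balls binary_matrix) := by unfold Pre_columns_as_truncated_balls; infer_instance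

def pvWitness_columns_as_truncated_balls : List (List Int) := [[1, 0], [0, 1]]

def Spec_columns_as_truncated_balls (binary_matrix : List (List Int)) (out : List (Int × Int)) : Prop := out = columns_as_truncated_balls_alt binary_matrix
instance (binary_matrix : List (List Int)) (out : List (Int × Int)) : Decidable (Spec_columns_as_truncated_balls binary_matrix out) := by unfold Spec_columns_as_truncated_balls; infer_instance

-- ===== CLAIM (what is proved, stated in full; the proofs are below) =====
def Claim_equal_columns_as_truncated_balls : Prop := ∀ (binary_matrix : List (List Int)), Dom_columns_as_truncated_balls binary_matrix → Pre_columns_as_truncated_balls binary_matrix → Spec_columns_as_truncated_balls binary_matrix (columns_as_truncated_balls binary_matrix)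

-- ===== LEMMAS AND PROOFS =====

-- truthiness indicator of a cell, per-column count, running counter vector, topmost truthy row
def pvInd (line : List Int) (j : Nat) : Int := if line.getD j 0 ≠ 0 then 1 else 0
def pvCnt (rows : List (List Int)) (j : Nat) : Nat :=
  rows.countP (fun r => decide (r.getD j 0 ≠ 0))
def pvCntVec (rows : List (List Int)) (c : List Int) : List Int :=
  rows.foldl (fun cc line => pvAddLine line cc) c
def pvFirst (rows : List (List Int)) (j : Nat) : Option Nat :=
  rows.findIdx? (fun r => decide (r.getD j 0 ≠ 0))

lemma pvAddLine_fold (line : List Int) : ∀ (s : Nat) (c : List Int) (j : Nat),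
    getElem? ((PySem.List.enumerate line (s : Int)).foldl pvStepA c) j =
      if s ≤ j then (getElem? c j).map (fun v => v + pvInd line (j - s)) else getElem? c j := by
  induction line with
  | nil =>
    intro s c j
    simp only [PySem.List.enumerate_nil, List.foldl_nil]
    split
    · cases h : getElem? c j <;> simp [pvInd]
    · rfl
  | cons e rest ih =>
    intro s c j
    rw [PySem.List.enumerate_cons, List.foldl_cons]
    have hs1 : (s : Int) + 1 = ((s + 1 : Nat) : Int) := by push_cast; ring
    rw [hs1, ih]
    have hstep : pvStepA c ((s : Int), e) = if e ≠ 0 then c.modify s (· + 1) else c := by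
      simp [pvStepA]
    rw [hstep]
    by_cases he : e = 0
    · subst he
      simp only [ne_eq, not_true_eq_false, if_false]
      rcases Nat.lt_trichotomy j s with hlt | heq | hgt
      · rw [if_neg (by omega), if_neg (by omega)]
      · subst heq
        rw [if_neg (by omega), if_pos (le_refl _)]
        cases h : getElem? c j <;> simp [pvInd]
      · rw [if_pos (by omega), if_pos (by omega)]
        have hind : pvInd ((0:Int) :: rest) (j - s) = pvInd rest (j - (s+1)) := by
          have : j - s = (j - (s+1)) + 1 := by omega
          rw [this]; simp [pvInd]
        rw [hind]
    · rw [if_pos he]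
      rcases Nat.lt_trichotomy j s with hlt | heq | hgt
      · rw [if_neg (by omega), if_neg (by omega)]
        rw [List.getElem?_modify]
        have : s ≠ j := by omega
        cases h : getElem? c j <;> simp [h, this]
      · subst heq
        rw [if_neg (by omega), if_pos (le_refl _)]
        rw [List.getElem?_modify]
        cases h : getElem? c j <;> simp [h, pvInd, Nat.sub_self, he]
      · rw [if_pos (by omega), if_pos (by omega)]
        rw [List.getElem?_modify]
        have hne : s ≠ j := by omega
        have hind : pvInd (e :: rest) (j - s) = pvInd rest (j - (s+1)) := by
          have : j - s = (j - (s+1)) + 1 := by omega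
          rw [this]; simp [pvInd]
        cases h : getElem? c j <;> simp [h, hne, hind]

lemma pvAddLine_get (line c : List Int) (j : Nat) :
    getElem? (pvAddLine line c) j = (getElem? c j).map (fun v => v + pvInd line j) := by
  have h := pvAddLine_fold line 0 c j
  simpa [pvAddLine] using h

lemma pvCntVec_get (rows : List (List Int)) : ∀ (c : List Int) (j : Nat),
    getElem? (pvCntVec rows c) j = (getElem? c j).map (fun v => v + (pvCnt rows j : Int)) := by
  induction rows with
  | nil => intro c j; cases h : getElem? c j <;> simp [pvCntVec, pvCnt, h]
  | cons r rows ih =>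
    intro c j
    have h1 : pvCntVec (r :: rows) c = pvCntVec rows (pvAddLine r c) := rfl
    rw [h1, ih, pvAddLine_get]
    have h2 : pvCnt (r :: rows) j = (if r.getD j 0 ≠ 0 then 1 else 0) + pvCnt rows j := by
      simp only [pvCnt, List.countP_cons]
      rw [Nat.add_comm]
      congr 1
      simp
    cases h : getElem? c j <;> simp [h, h2, pvInd] <;> split <;> push_cast <;> ring

lemma pvUpFold (rows : List (List Int)) : ∀ (acc : List (List Int)) (c : List Int),
    rows.foldl (fun (s : List (List Int) × List Int) line =>
        (s.1 ++ [s.2], pvAddLine line s.2)) (acc, c)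
      = (acc ++ (List.range rows.length).map (fun i => pvCntVec (rows.take i) c),
         pvCntVec rows c) := by
  induction rows with
  | nil => intro acc c; simp [pvCntVec]
  | cons r rows ih =>
    intro acc c
    rw [List.foldl_cons]
    rw [ih (acc ++ [c]) (pvAddLine r c)]
    simp only [Prod.mk.injEq]
    constructor
    · rw [List.append_assoc]
      congr 1
      rw [List.length_cons, List.range_succ_eq_map, List.map_cons, List.map_map]
      rfl
    · rfl

lemma pvDownFold (rows : List (List Int)) : ∀ (acc : List (List Int)) (c : List Int),
    rows.foldl (fun (s : List (List Int) × List Int) line =>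
        let c := pvAddLine line s.2
        (s.1 ++ [c], c)) (acc, c)
      = (acc ++ (List.range rows.length).map (fun i => pvCntVec (rows.take (i+1)) c),
         pvCntVec rows c) := by
  induction rows with
  | nil => intro acc c; simp [pvCntVec]
  | cons r rows ih =>
    intro acc c
    rw [List.foldl_cons]
    show rows.foldl _ (acc ++ [pvAddLine r c], pvAddLine r c) = _
    rw [ih (acc ++ [pvAddLine r c]) (pvAddLine r c)]
    simp only [Prod.mk.injEq]
    constructor
    · rw [List.append_assoc]
      congr 1
      rw [List.length_cons, List.range_succ_eq_map, List.map_cons, List.map_map]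
      rfl
    · rfl

lemma pvUpMatrix_eq (bm : List (List Int)) :
    pvUpMatrix bm = (List.range (bm.length + 1)).map
      (fun i => pvCntVec (bm.take i) (List.replicate (bm.headD []).length (0 : Int))) := by
  unfold pvUpMatrix
  rw [pvUpFold]
  rw [List.range_succ, List.map_append]
  simp [List.take_length]

lemma pvDownMatrix_eq (bm : List (List Int)) :
    pvDownMatrix bm = ((List.range bm.length).map
      (fun i => pvCntVec (bm.reverse.take (i+1))
        (List.replicate (bm.headD []).length (0 : Int)))).reverse := by
  unfold pvDownMatrix
  rw [pvDownFold]
  simp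

lemma pvUp_val (bm : List (List Int)) (i j : Nat) (hi : i ≤ bm.length)
    (hj : j < (bm.headD []).length) :
    ((pvUpMatrix bm).getD i []).getD j 0 = (pvCnt (bm.take i) j : Int) := by
  rw [pvUpMatrix_eq]
  have hrow : ((List.range (bm.length + 1)).map
      (fun i => pvCntVec (bm.take i) (List.replicate (bm.headD []).length (0 : Int)))).getD i []
      = pvCntVec (bm.take i) (List.replicate (bm.headD []).length (0 : Int)) := by
    rw [List.getD_eq_getElem?_getD, List.getElem?_map, List.getElem?_range (by omega)]
    simp
  rw [hrow]
  rw [List.getD_eq_getElem?_getD, pvCntVec_get]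
  rw [List.getElem?_replicate, if_pos hj]
  simp

lemma pvDown_val (bm : List (List Int)) (i j : Nat) (hi : i < bm.length)
    (hj : j < (bm.headD []).length) :
    ((pvDownMatrix bm).getD i []).getD j 0 = (pvCnt (bm.drop i) j : Int) := by
  rw [pvDownMatrix_eq]
  have hrow : (((List.range bm.length).map
      (fun i => pvCntVec (bm.reverse.take (i+1))
        (List.replicate (bm.headD []).length (0 : Int)))).reverse).getD i []
      = pvCntVec (bm.reverse.take (bm.length - 1 - i + 1))
        (List.replicate (bm.headD []).length (0 : Int)) := by
    rw [List.getD_eq_getElem?_getD]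
    rw [List.getElem?_reverse (by simpa using hi)]
    rw [List.length_map, List.length_range]
    rw [List.getElem?_map, List.getElem?_range (by omega)]
    simp
  rw [hrow]
  rw [List.getD_eq_getElem?_getD, pvCntVec_get]
  rw [List.getElem?_replicate, if_pos hj]
  have h1 : bm.length - 1 - i + 1 = bm.length - i := by omega
  rw [h1]
  have h2 : bm.reverse.take (bm.length - i) = (bm.drop i).reverse := by
    rw [List.reverse_drop]
  rw [h2]
  have h3 : pvCnt (bm.drop i).reverse j = pvCnt (bm.drop i) j := by
    simp [pvCnt, List.countP_reverse]
  rw [h3]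
  simp

lemma pvRowScan (line : List Int) (iv : Int) : ∀ (s : Nat)
    (t : List Int × List (Option Int)) (j : Nat),
    (getElem? ((PySem.List.enumerate line (s : Int)).foldl (pvStepScan iv) t).1 j =
      (if s ≤ j then (getElem? t.1 j).map (fun v => v + pvInd line (j - s)) else getElem? t.1 j)) ∧
    (getElem? ((PySem.List.enumerate line (s : Int)).foldl (pvStepScan iv) t).2 j =
      (if s ≤ j then (getElem? t.2 j).map
          (fun o => if line.getD (j - s) 0 ≠ 0 ∧ o = none then some iv else o)
        else getElem? t.2 j)) := by
  induction line with
  | nil =>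
    intro s t j
    simp only [PySem.List.enumerate_nil, List.foldl_nil]
    constructor
    · split
      · cases h : getElem? t.1 j <;> simp [pvInd]
      · rfl
    · split
      · cases h : getElem? t.2 j <;> simp
      · rfl
  | cons e rest ih =>
    intro s t j
    rw [PySem.List.enumerate_cons, List.foldl_cons]
    have hs1 : (s : Int) + 1 = ((s + 1 : Nat) : Int) := by push_cast; ring
    rw [hs1]
    obtain ⟨ih1, ih2⟩ := ih (s+1) (pvStepScan iv t ((s : Int), e)) j
    rw [ih1, ih2]
    by_cases he : e = 0
    · subst he
      have hstep : pvStepScan iv t ((s : Int), (0:Int)) = t := by simp [pvStepScan]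
      rw [hstep]
      constructor
      · rcases Nat.lt_trichotomy j s with hlt | heq | hgt
        · rw [if_neg (by omega), if_neg (by omega)]
        · subst heq
          rw [if_neg (by omega), if_pos (le_refl _)]
          cases h : getElem? t.1 j <;> simp [pvInd]
        · rw [if_pos (by omega), if_pos (by omega)]
          have hind : pvInd ((0:Int) :: rest) (j - s) = pvInd rest (j - (s+1)) := by
            have hd : j - s = (j - (s+1)) + 1 := by omega
            rw [hd]; simp [pvInd]
          rw [hind]
      · rcases Nat.lt_trichotomy j s with hlt | heq | hgt
        · rw [if_neg (by omega), if_neg (by omega)]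
        · subst heq
          rw [if_neg (by omega), if_pos (le_refl _)]
          cases h : getElem? t.2 j <;> simp
        · rw [if_pos (by omega), if_pos (by omega)]
          have hd : j - s = (j - (s+1)) + 1 := by omega
          rw [hd]
          simp only [List.getD_cons_succ]
    · have hp1 : (pvStepScan iv t ((s : Int), e)).1 = t.1.modify s (· + 1) := by
        simp [pvStepScan, he]
      have hp2 : (pvStepScan iv t ((s : Int), e)).2 =
          if t.2.getD s none = none then t.2.set s (some iv) else t.2 := by
        simp [pvStepScan, he]
      constructor
      · rw [hp1]
        rcases Nat.lt_trichotomy j s with hlt | heq | hgt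
        · rw [if_neg (show ¬ (s+1 ≤ j) by omega), if_neg (show ¬ (s ≤ j) by omega)]
          simp only [List.getElem?_modify]
          have hne : s ≠ j := by omega
          cases h : getElem? t.1 j <;> simp [h, hne]
        · subst heq
          rw [if_neg (show ¬ (j+1 ≤ j) by omega), if_pos (le_refl _)]
          simp only [List.getElem?_modify]
          cases h : getElem? t.1 j <;> simp [h, pvInd, he]
        · rw [if_pos (show s+1 ≤ j by omega), if_pos (show s ≤ j by omega)]
          simp only [List.getElem?_modify]
          have hne : s ≠ j := by omega
          have hind : pvInd (e :: rest) (j - s) = pvInd rest (j - (s+1)) := by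
            have hd : j - s = (j - (s+1)) + 1 := by omega
            rw [hd]; simp [pvInd]
          cases h : getElem? t.1 j <;> simp [h, hne, hind]
      · rw [hp2]
        rcases Nat.lt_trichotomy j s with hlt | heq | hgt
        · rw [if_neg (show ¬ (s+1 ≤ j) by omega), if_neg (show ¬ (s ≤ j) by omega)]
          have hne : s ≠ j := by omega
          split
          · rw [List.getElem?_set]
            simp [hne]
          · rfl
        · subst heq
          rw [if_neg (show ¬ (j+1 ≤ j) by omega), if_pos (le_refl _)]
          have hd : List.getD t.2 j none = (getElem? t.2 j).getD none :=
            List.getD_eq_getElem?_getD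
          cases h : getElem? t.2 j with
          | none =>
            have hnone : List.getD t.2 j none = none := by rw [hd, h]; rfl
            rw [if_pos hnone, List.getElem?_set]
            have hlen : ¬ j < t.2.length := by
              intro hc
              rw [List.getElem?_eq_getElem hc] at h
              simp at h
            simp [hlen, h]
          | some o =>
            have hgd : List.getD t.2 j none = o := by rw [hd, h]; rfl
            cases o with
            | none =>
              rw [if_pos hgd, List.getElem?_set]
              have hlen : j < t.2.length := by
                by_contra hc
                rw [List.getElem?_eq_none (by omega)] at h
                simp at h
              simp [hlen, pvInd, he, Nat.sub_self]
            | some v =>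
              rw [if_neg (by rw [hgd]; simp), h]
              simp
        · rw [if_pos (show s+1 ≤ j by omega), if_pos (show s ≤ j by omega)]
          have hne : s ≠ j := by omega
          have hd : j - s = (j - (s+1)) + 1 := by omega
          have hsame : getElem? (if t.2.getD s none = none then t.2.set s (some iv) else t.2) j
              = getElem? t.2 j := by
            split
            · rw [List.getElem?_set]; simp [hne]
            · rfl
          rw [hsame, hd]
          simp only [List.getD_cons_succ]

lemma pvScanFold (bm : List (List Int)) : ∀ (s : Nat)
    (t : List Int × List (Option Int)) (j : Nat),
    (getElem? ((PySem.List.enumerate bm (s : Int)).foldl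
        (fun t pi => (PySem.List.enumerate pi.2).foldl (pvStepScan pi.1) t) t).1 j =
      (getElem? t.1 j).map (fun v => v + (pvCnt bm j : Int))) ∧
    (getElem? ((PySem.List.enumerate bm (s : Int)).foldl
        (fun t pi => (PySem.List.enumerate pi.2).foldl (pvStepScan pi.1) t) t).2 j =
      (getElem? t.2 j).map (fun o => if o = none
          then (pvFirst bm j).map (fun k => ((s + k : Nat) : Int)) else o)) := by
  induction bm with
  | nil =>
    intro s t j
    simp only [PySem.List.enumerate_nil, List.foldl_nil]
    constructor
    · cases h : getElem? t.1 j <;> simp [pvCnt]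
    · cases h : getElem? t.2 j with
      | none => simp
      | some o => cases o <;> simp [pvFirst]
  | cons r rows ih =>
    intro s t j
    rw [PySem.List.enumerate_cons, List.foldl_cons]
    have hs1 : (s : Int) + 1 = ((s + 1 : Nat) : Int) := by push_cast; ring
    rw [hs1]
    set t' := (PySem.List.enumerate r (0 : Int)).foldl (pvStepScan (s : Int)) t with ht'
    obtain ⟨ih1, ih2⟩ := ih (s+1) t' j
    have hz : ((0 : Nat) : Int) = (0 : Int) := rfl
    obtain ⟨hr1, hr2⟩ := pvRowScan r ((s : Int)) 0 t j
    rw [hz] at hr1 hr2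
    rw [if_pos (Nat.zero_le j)] at hr1 hr2
    simp only [Nat.sub_zero] at hr1 hr2
    constructor
    · rw [ih1, hr1]
      have hcnt : (pvCnt (r :: rows) j : Int) = pvInd r j + (pvCnt rows j : Int) := by
        simp only [pvCnt, List.countP_cons, pvInd]
        rcases Decidable.em (r.getD j 0 ≠ 0) with hh | hh <;> simp [hh] <;> push_cast <;> ring
      cases h : getElem? t.1 j <;> simp [h, hcnt] <;> ring
    · rw [ih2, hr2]
      have hfi : pvFirst (r :: rows) j =
          if r.getD j 0 ≠ 0 then some 0 else (pvFirst rows j).map (fun i => i + 1) := by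
        simp only [pvFirst, List.findIdx?_cons]
        rcases Decidable.em (r.getD j 0 ≠ 0) with hh | hh <;> simp [hh]
      cases h : getElem? t.2 j with
      | none => simp
      | some o =>
        simp only [Option.map_some]
        congr 1
        cases o with
        | some v => simp
        | none =>
          rcases Decidable.em ((getElem? r j).getD 0 = 0) with hh | hh
          · cases hf : pvFirst rows j with
            | none => simp [hfi, hh, hf, List.getD_eq_getElem?_getD]
            | some k =>
              simp [hfi, hh, hf, List.getD_eq_getElem?_getD]
              push_cast
              ring
          · simp [hfi, hh, List.getD_eq_getElem?_getD]

lemma pvScan_total (bm : List (List Int)) (j : Nat) (hj : j < (bm.headD []).length) :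
    (pvColScan bm).1.getD j 0 = (pvCnt bm j : Int) := by
  unfold pvColScan
  rw [List.getD_eq_getElem?_getD]
  have h := (pvScanFold bm 0 (List.replicate (bm.headD []).length (0 : Int),
     List.replicate (bm.headD []).length (none : Option Int)) j).1
  simp only [Nat.cast_zero] at h
  rw [h]
  rw [List.getElem?_replicate, if_pos hj]
  simp

lemma pvScan_first (bm : List (List Int)) (j : Nat) (hj : j < (bm.headD []).length) :
    (pvColScan bm).2.getD j none = (pvFirst bm j).map (fun k => (k : Int)) := by
  unfold pvColScan
  rw [List.getD_eq_getElem?_getD]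
  have h := (pvScanFold bm 0 (List.replicate (bm.headD []).length (0 : Int),
     List.replicate (bm.headD []).length (none : Option Int)) j).2
  simp only [Nat.cast_zero] at h
  rw [h]
  rw [List.getElem?_replicate, if_pos hj]
  cases pvFirst bm j <;> simp

lemma pvFirst_iff (bm : List (List Int)) : ∀ (i j : Nat), i < bm.length →
    ((bm.getD i []).getD j 0) ≠ 0 →
    (pvFirst bm j = some i ↔ pvCnt (bm.take i) j = 0) := by
  induction bm with
  | nil => intro i j hi _; simp at hi
  | cons r rows ih =>
    intro i j hi hp
    cases i with
    | zero =>
      simp only [List.getD_cons_zero] at hp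
      have hb : (fun r => decide ((r : List Int).getD j 0 ≠ 0)) r = true := by simpa using hp
      rw [pvFirst, List.findIdx?_cons, if_pos hb]
      simp [pvCnt]
    | succ i =>
      simp only [List.getD_cons_succ] at hp
      have hi' : i < rows.length := by simpa using hi
      rw [pvFirst, List.findIdx?_cons]
      by_cases hr : r.getD j 0 ≠ 0
      · have hb : (fun r => decide ((r : List Int).getD j 0 ≠ 0)) r = true := by simpa using hr
        rw [if_pos hb]
        constructor
        · intro hc; simp at hc
        · intro hc
          exfalso
          have hmem : r ∈ (r :: rows).take (i+1) := by simp
          have hz := List.countP_eq_zero.mp hc r hmem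
          exact hz (by simpa using hr)
      · have hb : ¬ ((fun r => decide ((r : List Int).getD j 0 ≠ 0)) r = true) := by
          simpa using hr
        rw [if_neg hb]
        have hr0 : r.getD j 0 = 0 := not_not.mp hr
        have hcnt : pvCnt ((r :: rows).take (i+1)) j = pvCnt (rows.take i) j := by
          rw [List.getD_eq_getElem?_getD] at hr0
          simp [pvCnt, List.take_succ_cons, hr0]
        rw [hcnt, ← ih i j hi' hp]
        rw [show List.findIdx? (fun r => decide ((r : List Int).getD j 0 ≠ 0)) rows
            = pvFirst rows j from rfl]
        cases hf : pvFirst rows j with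
        | none => simp
        | some k => simp

lemma pvCnt_split (bm : List (List Int)) (i j : Nat) :
    pvCnt bm j = pvCnt (bm.take i) j + pvCnt (bm.drop i) j := by
  rw [pvCnt, pvCnt, pvCnt, ← List.countP_append, List.take_append_drop]

lemma pvMainEq (bm : List (List Int))
    (hpre : Pre_columns_as_truncated_balls bm) :
    columns_as_truncated_balls bm = columns_as_truncated_balls_alt bm := by
  unfold Pre_columns_as_truncated_balls at hpre
  obtain ⟨-, hbound⟩ := hpre
  unfold columns_as_truncated_balls columns_as_truncated_balls_alt
  apply PySem.List.foldl_congr_mem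
  intro acc pi hpi
  rw [PySem.List.mem_enumerate_iff] at hpi
  obtain ⟨i, hi, rfl⟩ := hpi
  congr 1
  apply PySem.List.foldl_congr_mem
  intro s pj hpj
  rw [PySem.List.mem_enumerate_iff] at hpj
  obtain ⟨j, hj, rfl⟩ := hpj
  simp only [zero_add, Int.toNat_natCast]
  by_cases he : bm[i][j] = 0
  · simp [he]
  · have hw : j < (bm.headD []).length := by
      have hr := hbound bm[i] (List.getElem_mem hi) ((0 : Int) + (j : Int), bm[i][j])
        (by rw [PySem.List.mem_enumerate_iff]; exact ⟨j, hj, rfl⟩) (by simpa using he)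
      simpa using hr
    have hj' : j < bm[i].length := by simpa using hj
    have htr : ((bm.getD i []).getD j 0) ≠ 0 := by
      have h1 : bm.getD i [] = bm[i] := by
        rw [List.getD_eq_getElem?_getD, List.getElem?_eq_getElem hi]
        rfl
      rw [h1, List.getD_eq_getElem?_getD, List.getElem?_eq_getElem hj']
      simpa using he
    have hup := pvUp_val bm i j (le_of_lt hi) hw
    have hdown := pvDown_val bm i j hi hw
    have htot := pvScan_total bm j hw
    have hfirstv := pvScan_first bm j hw
    have hiff := pvFirst_iff bm i j hi htr
    rw [hup, hdown, htot, hfirstv]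
    by_cases hz : pvCnt (bm.take i) j = 0
    · have h2 : pvFirst bm j = some i := hiff.mpr hz
      have hdt : ((pvCnt (bm.drop i) j : Nat) : Int) = ((pvCnt bm j : Nat) : Int) := by
        have := pvCnt_split bm i j
        omega
      have hsome : (pvFirst bm j).map (fun k => (k : Int)) = some (i : Int) := by
        rw [h2]
        rfl
      rw [hsome, hdt, hz]
      simp
    · have hc1 : ¬ (bm[i][j] ≠ 0 ∧ ((pvCnt (bm.take i) j : Nat) : Int) = 0 ∧
          s.1 < ((pvCnt (bm.drop i) j : Nat) : Int)) := by
        rintro ⟨-, hcz, -⟩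
        exact hz (by exact_mod_cast hcz)
      have hc2 : ¬ (bm[i][j] ≠ 0 ∧ (pvFirst bm j).map (fun k => (k : Int)) = some (i : Int) ∧
          s.1 < ((pvCnt bm j : Nat) : Int)) := by
        rintro ⟨-, hcf, -⟩
        apply hz
        apply hiff.mp
        cases hf : pvFirst bm j with
        | none => rw [hf] at hcf; simp at hcf
        | some k =>
          rw [hf] at hcf
          have hcf' : some ((k : Nat) : Int) = some ((i : Nat) : Int) := hcf
          have hki : k = i := by
            injection hcf' with hv
            exact_mod_cast hv
          rw [hki]
      rw [if_neg hc1, if_neg hc2]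

-- ===== VERDICT (by name: the statement is the Claim_ definition above) =====
theorem columns_as_truncated_balls_spec : Claim_equal_columns_as_truncated_balls := by
  intro bm _ hpre
  unfold Spec_columns_as_truncated_balls
  exact pvMainEq bm hpre
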